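-- pv_equiv track=rewrite | github.com/gjwlsdnr0115/Computer_Programming_Homework | lab8_2015198005/lab8_p2.py | removeValuesInPlace
-- ===== SOURCE A (Python) =====
-- def removeValuesInPlace(L, threshold):
--     """
--     removes elements in list that are above threshold
--     :param L: list to mutate
--     :param threshold: threshold value
--     :return: mutated list L
--     """
--     del_list = []   #list to contain elements to delete
--     for num in L:
--         if num > threshold:
--             del_list.append(num)    #append element to del_list
--     for num in del_list:
--         L.remove(num)   #remove elements that are in del_list
--     return L
-- ===== SOURCE B (Python) =====
-- def removeValuesInPlace(L, threshold):
--     """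
--     removes elements in list that are above threshold
--     (single in-place compaction pass: write pointer + truncation,
--     instead of collecting a delete list and calling L.remove per element)
--     :param L: list to mutate
--     :param threshold: threshold value
--     :return: mutated list L
--     """
--     w = 0
--     for i in range(len(L)):
--         v = L[i]
--         if v <= threshold:
--             L[w] = v
--             w += 1
--     del L[w:]
--     return L
-- ===== Notes on version B (the rewrite author's own statement) =====
-- stated objective: faster
-- what changed: Replaced A's two passes (collect elements above threshold into del_list, then call L.remove once per collected element, each remove scanning the list) with a single in-place two-pointer compaction pass that overwrites surviving elements at a write index and truncates the tail.
import Mathlib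
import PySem

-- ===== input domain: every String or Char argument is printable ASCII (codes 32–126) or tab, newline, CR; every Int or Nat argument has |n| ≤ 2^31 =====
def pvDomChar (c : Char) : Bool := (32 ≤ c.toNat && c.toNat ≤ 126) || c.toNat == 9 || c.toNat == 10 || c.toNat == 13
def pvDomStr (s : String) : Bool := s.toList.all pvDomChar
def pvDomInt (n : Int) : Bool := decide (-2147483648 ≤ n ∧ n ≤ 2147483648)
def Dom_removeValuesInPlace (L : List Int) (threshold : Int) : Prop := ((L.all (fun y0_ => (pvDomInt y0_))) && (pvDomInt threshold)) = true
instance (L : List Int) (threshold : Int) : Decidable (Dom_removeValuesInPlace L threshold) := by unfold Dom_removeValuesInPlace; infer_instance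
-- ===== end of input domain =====

-- B replaces A's collect-then-L.remove two-pass deletion (quadratic) with a single
-- in-place two-pointer compaction pass plus tail truncation (linear); both mutate L
-- identically in Python and return it; the theorem is about the returned value.


-- ===== PORT A =====
-- 'L.remove(num)': PySem.List.remove? returns none on ValueError; A never hits that
-- case (every num in del_list is still in the current list), so .getD keeps the port total.
def removeValuesInPlace (L : List Int) (threshold : Int) : List Int :=
  let del_list : List Int :=
    L.foldl (fun acc num => if threshold < num then acc ++ [num] else acc) []
  del_list.foldl (fun lst num => (PySem.List.remove? lst num).getD lst) L

-- ===== PORT B =====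
-- body of 'for i in range(len(L))': read v = L[i]; if v <= threshold write L[w] = v
-- (w always satisfies 0 ≤ w ≤ i < len, where pySetD is exact) and bump w.
def rvipAltStep (threshold : Int) (st : List Int × Int) (i : Int) : List Int × Int :=
  match PySem.List.pyGet? st.1 i with
  | some v => if v ≤ threshold then (PySem.List.pySetD st.1 st.2 v, st.2 + 1) else st
  | none => st   -- unreachable: i ranges over 0..len-1
def removeValuesInPlace_alt (L : List Int) (threshold : Int) : List Int :=
  let st := (PySem.List.pyRange 0 (L.length : Int) 1).foldl (rvipAltStep threshold) (L, 0)
  PySem.List.slice st.1 none (some st.2)   -- del L[w:]  (keep L[:w])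

-- ===== PRECONDITION & SPEC =====
def Spec_removeValuesInPlace (L : List Int) (threshold : Int) (out : List Int) : Prop := out = removeValuesInPlace_alt L threshold
instance (L : List Int) (threshold : Int) (out : List Int) : Decidable (Spec_removeValuesInPlace L threshold out) := by unfold Spec_removeValuesInPlace; infer_instance

-- ===== CLAIM (what is proved, stated in full; the proofs are below) =====
def Claim_equal_removeValuesInPlace : Prop := ∀ (L : List Int) (threshold : Int), Dom_removeValuesInPlace L threshold → Spec_removeValuesInPlace L threshold (removeValuesInPlace L threshold)

-- ===== LEMMAS AND PROOFS =====

-- removing, one by one, values that all satisfy p commutes with a head refuting p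
theorem rvip_foldl_remove_cons (p : Int → Bool) (x : Int) (hx : p x = false) :
    ∀ (ds lst : List Int), (∀ d ∈ ds, p d = true) →
      ds.foldl (fun l num => (PySem.List.remove? l num).getD l) (x :: lst)
        = x :: ds.foldl (fun l num => (PySem.List.remove? l num).getD l) lst := by
  intro ds
  induction ds with
  | nil => intro lst _; rfl
  | cons d ds ih =>
    intro lst hmem
    have hpd : p d = true := hmem d (by simp)
    have hdx : x ≠ d := by intro h; rw [h, hpd] at hx; cases hx
    simp only [List.foldl_cons]
    rw [PySem.List.remove?_cons_of_ne lst hdx]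
    have : (Option.map (fun r => x :: r) (PySem.List.remove? lst d)).getD (x :: lst)
        = x :: (PySem.List.remove? lst d).getD lst := by
      cases PySem.List.remove? lst d <;> rfl
    rw [this]
    exact ih _ (fun e he => hmem e (by simp [he]))

-- A's second loop, started on L with the elements of L satisfying p, leaves the elements refuting p
theorem rvip_remove_filter (p : Int → Bool) :
    ∀ L : List Int,
      (L.filter p).foldl (fun l num => (PySem.List.remove? l num).getD l) L
        = L.filter (fun x => !p x) := by
  intro L
  induction L with
  | nil => rfl
  | cons x L ih =>
    by_cases hpx : p x = true
    · simp only [List.filter_cons, hpx, if_pos, List.foldl_cons,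
        PySem.List.remove?_cons_self, Option.getD_some]
      simpa [hpx] using ih
    · have hpx' : p x = false := by simpa using hpx
      simp only [List.filter_cons, hpx', Bool.false_eq_true, if_neg, not_false_iff]
      rw [rvip_foldl_remove_cons p x hpx' _ _ (fun d hd => (List.mem_filter.mp hd).2)]
      simp [ih]

theorem rvip_A_eq_filter (L : List Int) (t : Int) :
    removeValuesInPlace L t = L.filter (fun x => !decide (t < x)) := by
  show (L.foldl (fun acc num => if t < num then acc ++ [num] else acc) []).foldl
      (fun lst num => (PySem.List.remove? lst num).getD lst) L
      = L.filter (fun x => !decide (t < x))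
  rw [PySem.List.foldl_append_ite_eq_filter]
  simpa using rvip_remove_filter (fun x => decide (t < x)) L

-- loop invariant for B: list = done part F ++ dead zone M ++ untouched suffix S, write index = |F|
theorem rvip_alt_inv (t : Int) :
    ∀ (S F M : List Int), ∃ M' : List Int,
      (PySem.List.pyRange ((F.length + M.length : Nat) : Int)
          ((F.length + M.length + S.length : Nat) : Int) 1).foldl (rvipAltStep t)
          (F ++ M ++ S, (F.length : Int))
        = (F ++ S.filter (fun x => decide (x ≤ t)) ++ M',
           ((F.length + (S.filter (fun x => decide (x ≤ t))).length : Nat) : Int)) := by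
  intro S
  induction S with
  | nil =>
    intro F M
    refine ⟨M, ?_⟩
    simp
  | cons s S ih =>
    intro F M
    have hab : ((F.length + M.length : Nat) : Int) < ((F.length + M.length + (s :: S).length : Nat) : Int) := by
      simp only [List.length_cons]; omega
    rw [PySem.List.pyRange_one_cons hab, List.foldl_cons]
    have hget : PySem.List.pyGet? (F ++ M ++ (s :: S)) ((F.length + M.length : Nat) : Int) = some s := by
      have := PySem.List.pyGet?_append_length (pre := F ++ M) (ys := S) (y := s)
      simpa [List.append_assoc] using this
    by_cases hst : s ≤ t
    · -- write s at index |F|, bump w; dead zone keeps its size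
      rcases M with _ | ⟨m, M2⟩
      · -- no dead zone: the write re-writes s over itself
        have h1 : rvipAltStep t (F ++ [] ++ (s :: S), (F.length : Int)) ((F.length + ([] : List Int).length : Nat) : Int)
            = ((F ++ [s]) ++ [] ++ S, (((F ++ [s]).length : Nat) : Int)) := by
          simp only [rvipAltStep, hget, if_pos hst, PySem.List.pySetD_natCast]
          refine congrArg₂ Prod.mk ?_ (by push_cast; simp)
          rw [List.append_nil, List.set_append_right _ _ (le_refl _)]
          simp
        rw [h1]
        have h2 : ((F.length + ([] : List Int).length : Nat) : Int) + 1
            = (((F ++ [s]).length + ([] : List Int).length : Nat) : Int) := by push_cast; simp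
        have h3 : ((F.length + ([] : List Int).length + (s :: S).length : Nat) : Int)
            = (((F ++ [s]).length + ([] : List Int).length + S.length : Nat) : Int) := by
          push_cast; simp; omega
        rw [h2, h3]
        obtain ⟨M', hM'⟩ := ih (F ++ [s]) []
        refine ⟨M', ?_⟩
        rw [hM']
        refine congrArg₂ Prod.mk (by simp [hst]) ?_
        simp [hst]; push_cast; ring
      · -- dead zone m :: M2: s overwrites m, and the old copy of s joins the dead zone
        have h1 : rvipAltStep t (F ++ (m :: M2) ++ (s :: S), (F.length : Int)) ((F.length + (m :: M2).length : Nat) : Int)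
            = ((F ++ [s]) ++ (M2 ++ [s]) ++ S, (((F ++ [s]).length : Nat) : Int)) := by
          simp only [rvipAltStep, hget, if_pos hst, PySem.List.pySetD_natCast]
          refine congrArg₂ Prod.mk ?_ (by push_cast; simp)
          rw [List.append_assoc, List.set_append_right _ _ (le_refl _)]
          simp
        rw [h1]
        have h2 : ((F.length + (m :: M2).length : Nat) : Int) + 1
            = (((F ++ [s]).length + (M2 ++ [s]).length : Nat) : Int) := by push_cast; simp; ring
        have h3 : ((F.length + (m :: M2).length + (s :: S).length : Nat) : Int)
            = (((F ++ [s]).length + (M2 ++ [s]).length + S.length : Nat) : Int) := by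
          push_cast; simp; omega
        rw [h2, h3]
        obtain ⟨M', hM'⟩ := ih (F ++ [s]) (M2 ++ [s])
        refine ⟨M', ?_⟩
        rw [hM']
        refine congrArg₂ Prod.mk (by simp [hst]) ?_
        simp [hst]; push_cast; ring
    · -- skip: s joins the dead zone
      have h1 : rvipAltStep t (F ++ M ++ (s :: S), (F.length : Int)) ((F.length + M.length : Nat) : Int)
          = (F ++ (M ++ [s]) ++ S, (F.length : Int)) := by
        simp only [rvipAltStep, hget, if_neg hst]
        simp [List.append_assoc]
      rw [h1]
      have h2 : ((F.length + M.length : Nat) : Int) + 1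
          = ((F.length + (M ++ [s]).length : Nat) : Int) := by push_cast; simp; ring
      have h3 : ((F.length + M.length + (s :: S).length : Nat) : Int)
          = ((F.length + (M ++ [s]).length + S.length : Nat) : Int) := by push_cast; simp; omega
      rw [h2, h3]
      obtain ⟨M', hM'⟩ := ih F (M ++ [s])
      refine ⟨M', ?_⟩
      rw [hM']
      refine congrArg₂ Prod.mk ?_ ?_ <;> simp [hst]

theorem rvip_B_eq_filter (L : List Int) (t : Int) :
    removeValuesInPlace_alt L t = L.filter (fun x => decide (x ≤ t)) := by
  obtain ⟨M', hM'⟩ := rvip_alt_inv t L [] []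
  simp only [List.nil_append, List.length_nil, Nat.zero_add, Nat.cast_zero] at hM'
  show PySem.List.slice ((PySem.List.pyRange 0 (L.length : Int) 1).foldl (rvipAltStep t) (L, 0)).1 none
      (some ((PySem.List.pyRange 0 (L.length : Int) 1).foldl (rvipAltStep t) (L, 0)).2)
      = L.filter (fun x => decide (x ≤ t))
  rw [hM']
  dsimp only
  rw [PySem.List.slice_to_natCast]
  simp

-- ===== VERDICT (by name: the statement is the Claim_ definition above) =====
theorem removeValuesInPlace_spec : Claim_equal_removeValuesInPlace := by
  intro L t _
  unfold Spec_removeValuesInPlace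
  rw [rvip_A_eq_filter, rvip_B_eq_filter]
  exact List.filter_congr (fun x _ => by by_cases h : t < x <;> simp [h] <;> omega)
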